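-- pv_equiv track=rewrite | github.com/aygp-dr/values-compass | scripts/static_value_clusters.py | find_common_themes
-- ===== SOURCE A (Python) =====
-- def find_common_themes(values):
--     """Identify common themes in a list of values."""
--     # This is a simple implementation - could be enhanced with more NLP techniques
--     themes = []
--
--     # Check for common prefixes
--     prefixes = ["being", "help", "fair", "honest", "care", "respect", "truth"]
--     for prefix in prefixes:
--         if any(v.startswith(prefix) for v in values):
--             themes.append(f"{prefix}-related")
--
--     # Look for semantic categories
--     categories = {
--         "interpersonal": ["helpful", "kind", "nice", "respect", "polite", "courteous", "empathy"],
--         "intellectual": ["intelligence", "knowledge", "wisdom", "reasoning", "thoughtful"],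
--         "ethical": ["ethics", "morality", "integrity", "honesty", "fairness", "responsibility"],
--         "communication": ["clarity", "transparency", "direct", "informative"],
--         "competence": ["competence", "professional", "thorough", "useful", "accurate"]
--     }
--
--     for category, keywords in categories.items():
--         if any(any(kw in v.lower() for v in values) for kw in keywords):
--             themes.append(category)
--
--     return themes or ["mixed themes"]
-- ===== SOURCE B (Python) =====
-- def find_common_themes(values):
--     """Identify common themes in a list of values."""
--     prefixes = ["being", "help", "fair", "honest", "care", "respect", "truth"]
--     categories = {
--         "interpersonal": ["helpful", "kind", "nice", "respect", "polite", "courteous", "empathy"],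
--         "intellectual": ["intelligence", "knowledge", "wisdom", "reasoning", "thoughtful"],
--         "ethical": ["ethics", "morality", "integrity", "honesty", "fairness", "responsibility"],
--         "communication": ["clarity", "transparency", "direct", "informative"],
--         "competence": ["competence", "professional", "thorough", "useful", "accurate"],
--     }
--     # single pass over values: record which prefixes / categories ever match
--     matched_prefixes = set()
--     matched_categories = set()
--     for v in values:
--         vlow = v.lower()
--         for p in prefixes:
--             if v.startswith(p):
--                 matched_prefixes.add(p)
--         for cat, kws in categories.items():
--             if any(kw in vlow for kw in kws):
--                 matched_categories.add(cat)
--     themes = [f"{p}-related" for p in prefixes if p in matched_prefixes]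
--     themes += [c for c in categories if c in matched_categories]
--     return themes or ["mixed themes"]
-- ===== Notes on version B (the rewrite author's own statement) =====
-- stated objective: alternative
-- what changed: A rescans the whole values list once per prefix and once per category keyword; B makes a single pass over values (lower-casing each value once) collecting matched prefixes and categories into sets, then emits the themes from the fixed tables in order.
import Mathlib
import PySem

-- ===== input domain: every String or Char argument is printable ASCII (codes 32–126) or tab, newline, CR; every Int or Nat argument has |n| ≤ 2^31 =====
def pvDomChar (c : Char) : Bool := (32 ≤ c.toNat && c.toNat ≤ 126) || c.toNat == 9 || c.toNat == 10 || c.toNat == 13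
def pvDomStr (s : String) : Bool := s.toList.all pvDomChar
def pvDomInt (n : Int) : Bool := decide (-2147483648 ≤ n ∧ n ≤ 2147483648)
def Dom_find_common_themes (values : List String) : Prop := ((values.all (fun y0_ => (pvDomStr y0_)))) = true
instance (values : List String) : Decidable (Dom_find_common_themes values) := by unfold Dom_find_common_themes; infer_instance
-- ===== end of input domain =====

-- B replaces A's per-theme rescans of `values` by one pass over `values` collecting matched
-- prefixes/categories into sets, then emits themes from the fixed tables (objective: alternative).

-- shared literal tables (the same constants both Pythons write out)
def pvPrefixes : List String := ["being", "help", "fair", "honest", "care", "respect", "truth"]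
def pvCategories : List (String × List String) :=
  [("interpersonal", ["helpful", "kind", "nice", "respect", "polite", "courteous", "empathy"]),
   ("intellectual", ["intelligence", "knowledge", "wisdom", "reasoning", "thoughtful"]),
   ("ethical", ["ethics", "morality", "integrity", "honesty", "fairness", "responsibility"]),
   ("communication", ["clarity", "transparency", "direct", "informative"]),
   ("competence", ["competence", "professional", "thorough", "useful", "accurate"])]

-- ===== PORT A =====
def find_common_themes (values : List String) : List String :=
  let themes : List String := []
  let themes := pvPrefixes.foldl (fun th p =>
    if values.any (fun v => PySem.Str.startswith v p) then th ++ [p ++ "-related"] else th) themes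
  let themes := pvCategories.foldl (fun th ck =>
    if ck.2.any (fun kw => values.any (fun v => PySem.Str.isIn kw (PySem.Str.lower v)))
    then th ++ [ck.1] else th) themes
  if themes.isEmpty then ["mixed themes"] else themes

-- ===== PORT B =====
def find_common_themes_alt (values : List String) : List String :=
  let st := values.foldl
    (fun (st : PySem.Set String × PySem.Set String) v =>
      let vlow := PySem.Str.lower v
      (pvPrefixes.foldl (fun mp p => if PySem.Str.startswith v p then PySem.Set.add mp p else mp) st.1,
       pvCategories.foldl (fun mc ck =>
         if ck.2.any (fun kw => PySem.Str.isIn kw vlow) then PySem.Set.add mc ck.1 else mc) st.2))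
    (PySem.Set.empty, PySem.Set.empty)
  let themes :=
    (pvPrefixes.filter (fun p => PySem.Set.contains st.1 p)).map (fun p => p ++ "-related")
    ++ (pvCategories.filter (fun ck => PySem.Set.contains st.2 ck.1)).map (fun ck => ck.1)
  if themes.isEmpty then ["mixed themes"] else themes

-- ===== PRECONDITION & SPEC =====
def Spec_find_common_themes (values : List String) (out : List String) : Prop := out = find_common_themes_alt values
instance (values : List String) (out : List String) : Decidable (Spec_find_common_themes values out) := by unfold Spec_find_common_themes; infer_instance

-- ===== CLAIM (what is proved, stated in full; the proofs are below) =====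
def Claim_equal_find_common_themes : Prop := ∀ (values : List String), Dom_find_common_themes values → Spec_find_common_themes values (find_common_themes values)

-- ===== LEMMAS AND PROOFS =====

-- one value's inner loop: p lands in the set iff it was there or some table entry with key p matches v
theorem pv_mem_inner {α : Type} (L : List α) (t : α → Bool) (k : α → String)
    (s : List String) (p : String) :
    p ∈ L.foldl (fun s x => if t x then PySem.Set.add s (k x) else s) s ↔
      p ∈ s ∨ ∃ x ∈ L, t x = true ∧ k x = p := by
  induction L generalizing s with
  | nil => simp
  | cons x L ih =>
    simp only [List.foldl_cons, ih]
    by_cases h : t x = true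
    · simp [h, PySem.Set.mem_add]; try tauto
    · simp only [Bool.not_eq_true] at h
      simp [h]; try tauto

-- the whole pass: p is matched iff some table entry with key p matches some value
theorem pv_mem_outer {α : Type} (L : List α) (t : String → α → Bool) (k : α → String)
    (values : List String) (s : List String) (p : String) :
    p ∈ values.foldl (fun s v => L.foldl (fun s x => if t v x then PySem.Set.add s (k x) else s) s) s ↔
      p ∈ s ∨ ∃ x ∈ L, k x = p ∧ ∃ v ∈ values, t v x = true := by
  induction values generalizing s with
  | nil => simp
  | cons v values ih =>
    simp only [List.foldl_cons, ih, pv_mem_inner]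
    constructor
    · rintro (⟨h | ⟨x, hx, ht, hk⟩⟩ | ⟨x, hx, hk, w, hw, ht⟩)
      · exact Or.inl h
      · exact Or.inr ⟨x, hx, hk, v, by simp, ht⟩
      · exact Or.inr ⟨x, hx, hk, w, by simp [hw], ht⟩
    · rintro (h | ⟨x, hx, hk, w, hw, ht⟩)
      · exact Or.inl (Or.inl h)
      · rcases List.mem_cons.mp hw with rfl | hw
        · exact Or.inl (Or.inr ⟨x, hx, ht, hk⟩)
        · exact Or.inr ⟨x, hx, hk, w, hw, ht⟩

-- ===== VERDICT (by name: the statement is the Claim_ definition above) =====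

theorem find_common_themes_spec : Claim_equal_find_common_themes := by
  intro values _
  unfold Spec_find_common_themes find_common_themes find_common_themes_alt
  rw [PySem.List.foldl_prod_mk
        (f := fun s v => pvPrefixes.foldl
          (fun mp p => if PySem.Str.startswith v p then PySem.Set.add mp p else mp) s)
        (g := fun s v => pvCategories.foldl
          (fun mc ck => if ck.2.any (fun kw => PySem.Str.isIn kw (PySem.Str.lower v))
                        then PySem.Set.add mc ck.1 else mc) s)]
  simp only [PySem.List.foldl_append_if, List.nil_append]
  have hpref : pvPrefixes.filter
        (fun p => PySem.Set.contains
          (values.foldl (fun s v => pvPrefixes.foldl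
            (fun mp p => if PySem.Str.startswith v p then PySem.Set.add mp p else mp) s)
            PySem.Set.empty) p)
      = pvPrefixes.filter (fun p => values.any (fun v => PySem.Str.startswith v p)) := by
    apply List.filter_congr
    intro p hp
    rw [Bool.eq_iff_iff, PySem.Set.contains_iff,
      pv_mem_outer pvPrefixes (fun v p => PySem.Str.startswith v p) (fun p => p)]
    simp only [PySem.Set.empty, List.not_mem_nil, false_or, List.any_eq_true]
    constructor
    · rintro ⟨x, _, rfl, v, hv, ht⟩; exact ⟨v, hv, ht⟩
    · rintro ⟨v, hv, ht⟩; exact ⟨p, hp, rfl, v, hv, ht⟩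
  have hkeys : ∀ x ∈ pvCategories, ∀ y ∈ pvCategories, x.1 = y.1 → x = y := by decide
  have hcat : pvCategories.filter
        (fun ck => PySem.Set.contains
          (values.foldl (fun s v => pvCategories.foldl
            (fun mc ck => if ck.2.any (fun kw => PySem.Str.isIn kw (PySem.Str.lower v))
                          then PySem.Set.add mc ck.1 else mc) s)
            PySem.Set.empty) ck.1)
      = pvCategories.filter
          (fun ck => ck.2.any (fun kw => values.any (fun v => PySem.Str.isIn kw (PySem.Str.lower v)))) := by
    apply List.filter_congr
    intro ck hck
    rw [Bool.eq_iff_iff, PySem.Set.contains_iff,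
      pv_mem_outer pvCategories
        (fun v ck => ck.2.any (fun kw => PySem.Str.isIn kw (PySem.Str.lower v)))
        (fun ck => ck.1)]
    simp only [PySem.Set.empty, List.not_mem_nil, false_or, List.any_eq_true]
    constructor
    · rintro ⟨x, hx, hk, v, hv, kw, hkw, ht⟩
      rcases hkeys x hx ck hck hk with rfl
      exact ⟨kw, hkw, v, hv, ht⟩
    · rintro ⟨kw, hkw, v, hv, ht⟩
      exact ⟨ck, hck, rfl, v, hv, kw, hkw, ht⟩
  rw [hpref, hcat]
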